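-- pv_equiv track=rewrite | github.com/woodywarhol9/algorithm-practice | programmers/solved/lv2_영어끝말잇기.py | solution
-- ===== SOURCE A (Python) =====
-- def solution(n, words):
--     answer = [0, 0]
--     # 중복 단어 체크
--     word_set = set()
--     last_word = ""
--     # 끝말잇기 시작
--     for idx, word in enumerate(words):
--         # 초기 문자 없는 경우
--         if not last_word:
--             last_word = word
--             word_set.add(last_word)
--             continue
--         # 끝말잇기 실패 처리
--         if word in word_set or word[0] != last_word[-1]:
--             answer = [idx % n + 1, idx // n + 1]
--             break
--         # 정상적으로 진행
--         else:
--             last_word = word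
--             word_set.add(last_word)
--     return answer
-- ===== SOURCE B (Python) =====
-- def solution(n, words):
--     # The chain starts at the first nonempty word; from there two independent
--     # scans find the earliest chain-break index and the earliest duplicate
--     # index, and the first failure overall is the minimum of the two.
--     start = next((i for i in range(len(words)) if words[i]), len(words))
--     inf = len(words)
--     first_break = next((i for i in range(start + 1, len(words))
--                         if words[i][:1] != words[i - 1][-1:]), inf)
--     first_dup = next((i for i in range(start + 1, len(words))
--                       if words[i] in words[:i]), inf)
--     idx = min(first_break, first_dup)
--     if idx == inf:
--         return [0, 0]
--     return [idx % n + 1, idx // n + 1]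
-- ===== Notes on version B (the rewrite author's own statement) =====
-- stated objective: alternative
-- what changed: Replaces A's single early-exit scan carrying a seen-set and last-word state with a precomputed chain-start index (first nonempty word) plus two independent scans (first chain-break index via slice comparison, first duplicate index) combined by a minimum; Pre_ excludes n = 0, where A raises ZeroDivisionError whenever a failure exists.
-- outside the precondition, e.g. on solution(0, ['ab', 'bc']): A returns [0, 0], B returns [0, 0]
import Mathlib
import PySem

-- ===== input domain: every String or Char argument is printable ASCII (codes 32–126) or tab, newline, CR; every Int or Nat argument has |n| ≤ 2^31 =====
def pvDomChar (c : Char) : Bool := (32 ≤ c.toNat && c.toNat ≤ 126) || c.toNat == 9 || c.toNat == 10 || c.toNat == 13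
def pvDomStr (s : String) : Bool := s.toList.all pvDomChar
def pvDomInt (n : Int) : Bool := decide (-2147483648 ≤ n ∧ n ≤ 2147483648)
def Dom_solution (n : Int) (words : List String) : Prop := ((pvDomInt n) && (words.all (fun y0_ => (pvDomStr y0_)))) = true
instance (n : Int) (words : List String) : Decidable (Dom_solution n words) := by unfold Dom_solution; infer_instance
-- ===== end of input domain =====

-- B replaces A's single early-exit scan (seen-set + last-word state) by two independent
-- scans from the chain's start — first chain-break index, first duplicate index — combined
-- by a minimum.

-- ===== PORT A =====
def solutionGo (n : Int) (ws : List String) (idx : Int) (wordSet : PySem.Set String)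
    (lastWord : String) : List Int :=
  match ws with
  | [] => [0, 0]
  | w :: rest =>
    if lastWord = "" then
      solutionGo n rest (idx + 1) (PySem.Set.add wordSet w) w
    else if PySem.Set.contains wordSet w || !(PySem.Str.pyGet? w 0 == PySem.Str.pyGet? lastWord (-1)) then
      [PySem.Int.mod idx n + 1, PySem.Int.floordiv idx n + 1]
    else
      solutionGo n rest (idx + 1) (PySem.Set.add wordSet w) w

def solution (n : Int) (words : List String) : List Int :=
  solutionGo n words 0 PySem.Set.empty ""

-- ===== PORT B =====
-- the two failure predicates B scans for (words[i][:1] != words[i-1][-1:]; words[i] in words[:i])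
def condBreak (words : List String) (i : Int) : Bool :=
  !(PySem.Str.slice (PySem.List.pyGetD words i "") none (some 1) ==
    PySem.Str.slice (PySem.List.pyGetD words (i - 1) "") (some (-1)) none)

def condDup (words : List String) (i : Int) : Bool :=
  (PySem.List.slice words (some 0) (some i)).contains (PySem.List.pyGetD words i "")

def solution_alt (n : Int) (words : List String) : List Int :=
  let start : Int := ((PySem.List.pyRange 0 words.length 1).find?
      (fun i => !(PySem.List.pyGetD words i "" == ""))).getD words.length
  let inf : Int := words.length
  let firstBreak : Int :=
    ((PySem.List.pyRange (start + 1) words.length 1).find? (condBreak words)).getD inf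
  let firstDup : Int :=
    ((PySem.List.pyRange (start + 1) words.length 1).find? (condDup words)).getD inf
  let idx := min firstBreak firstDup
  if idx == inf then [0, 0]
  else [PySem.Int.mod idx n + 1, PySem.Int.floordiv idx n + 1]

-- ===== PRECONDITION & SPEC =====
-- the word-chain failure test at position i (duplicate, or first letter ≠ previous last letter),
-- stated on the raw input for Pre_'s use only
def chainFail (words : List String) (i : Nat) : Prop :=
  words.getD i "" ∈ words.take i ∨
    (words.getD i "").toList.head? ≠ (words.getD (i - 1) "").toList.getLast?

-- Pre_ excludes n = 0 (A raises ZeroDivisionError whenever a failure exists; the only n = 0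
-- inputs A returns on are failure-free games) and the inputs on which A raises IndexError:
-- a first empty word at position ≥ 1 that the scan reaches because no failure precedes it.
def Pre_solution (n : Int) (words : List String) : Prop :=
  n ≠ 0 ∧ ¬ (1 ≤ words.findIdx (· = "") ∧ words.findIdx (· = "") < words.length ∧
      ∀ i < words.findIdx (· = ""), 1 ≤ i → ¬ chainFail words i)
instance (n : Int) (words : List String) : Decidable (Pre_solution n words) := by
  unfold Pre_solution chainFail; infer_instance

def pvWitness_solution : Int × List String := (2, ["ab", "ba", "ac"])

def Spec_solution (n : Int) (words : List String) (out : List Int) : Prop := out = solution_alt n words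
instance (n : Int) (words : List String) (out : List Int) : Decidable (Spec_solution n words out) := by
  unfold Spec_solution; infer_instance

-- ===== CLAIM (what is proved, stated in full; the proofs are below) =====
def Claim_equal_solution : Prop := ∀ (n : Int) (words : List String),
  Dom_solution n words → Pre_solution n words → Spec_solution n words (solution n words)

-- ===== LEMMAS AND PROOFS =====

-- render the first-failure index (none = no failure) the way both programs print it
def renderIdx (n : Int) (o : Option Int) : List Int :=
  match o with
  | none => [0, 0]
  | some idx => [PySem.Int.mod idx n + 1, PySem.Int.floordiv idx n + 1]

-- A's character-level form of B's slice-level break test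
def condBreakChar (words : List String) (i : Int) : Bool :=
  !(PySem.Str.pyGet? (PySem.List.pyGetD words i "") 0 ==
    PySem.Str.pyGet? (PySem.List.pyGetD words (i - 1) "") (-1))

def condAll (words : List String) (i : Int) : Bool := condDup words i || condBreakChar words i

lemma take_one_head (l : List Char) : l.take 1 = l.head?.toList := by
  cases l <;> simp

lemma drop_last (l : List Char) : l.drop (l.length - 1) = l.getLast?.toList := by
  induction l using List.reverseRecOn with
  | nil => simp
  | append_singleton xs d _ =>
    have h : (xs ++ [d]).length - 1 = xs.length := by simp
    rw [h, List.drop_left]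
    simp

lemma ofList_beq (xs ys : List Char) :
    (String.ofList xs == String.ofList ys) = (xs == ys) := by
  by_cases h : xs = ys
  · simp [h]
  · have hne : String.ofList xs ≠ String.ofList ys := fun he => h (by
      have := congrArg String.toList he
      simpa using this)
    simp [h, hne]

lemma option_toList_beq (a b : Option Char) : ((a.toList : List Char) == b.toList) = (a == b) := by
  cases a <;> cases b <;> simp

lemma slice_beq_char (w v : String) :
    (PySem.Str.slice w none (some 1) == PySem.Str.slice v (some (-1)) none)
      = (PySem.Str.pyGet? w 0 == PySem.Str.pyGet? v (-1)) := by
  rw [PySem.Str.slice, PySem.Str.slice, PySem.Str.pyGet?, PySem.Str.pyGet?,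
      PySem.Chars.slice, PySem.Chars.slice, PySem.Chars.pyGet?, PySem.Chars.pyGet?,
      PySem.List.slice_to (xs := w.toList) (b := 1) (by norm_num),
      PySem.List.slice_from_neg_one,
      PySem.List.pyGet?_zero, PySem.List.pyGet?_neg_one]
  have h1 : ((1 : Int)).toNat = 1 := rfl
  rw [h1, take_one_head, drop_last, ofList_beq, option_toList_beq, List.head?_eq_getElem?]

lemma condBreak_eq_char (words : List String) (i : Int) :
    condBreak words i = condBreakChar words i := by
  rw [condBreak, condBreakChar, slice_beq_char]

lemma find_min_merge (l : List Int) (p q : Int → Bool) (d : Int)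
    (hpair : l.Pairwise (· < ·)) (hle : ∀ x ∈ l, x ≤ d) :
    min ((l.find? p).getD d) ((l.find? q).getD d) = (l.find? (fun x => p x || q x)).getD d := by
  induction l with
  | nil => simp
  | cons x xs ih =>
    have hx : x ≤ d := hle x (by simp)
    have hlt : ∀ y ∈ xs, x < y := (List.pairwise_cons.mp hpair).1
    have hq' : ∀ r : Int → Bool, x ≤ (xs.find? r).getD d := by
      intro r
      cases hfind : xs.find? r with
      | none => simpa using hx
      | some y => simpa using le_of_lt (hlt y (List.mem_of_find?_eq_some hfind))
    cases hp : p x <;> cases hq : q x <;>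
      simp only [List.find?, hp, hq, Bool.or_false, Bool.or_true, Option.getD_some]
    · exact ih (List.pairwise_cons.mp hpair).2 (fun y hy => hle y (List.mem_cons_of_mem x hy))
    · exact min_eq_right (hq' p)
    · exact min_eq_left (hq' q)
    · exact min_self x

lemma ofList_append_singleton {α : Type} [BEq α] (p : List α) (w : α) :
    PySem.Set.ofList (p ++ [w]) = PySem.Set.add (PySem.Set.ofList p) w := by
  simp [PySem.Set.ofList_eq_foldl, List.foldl_append]

lemma contains_iff_mem {α : Type} [BEq α] [LawfulBEq α] (s : PySem.Set α) (x : α) :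
    PySem.Set.contains s x = true ↔ x ∈ s := by
  simp [PySem.Set.contains]

lemma pyGetD_append_length (p : List String) (w : String) (ws : List String) :
    PySem.List.pyGetD (p ++ w :: ws) (p.length : Int) "" = w := by
  simp [PySem.List.pyGetD_natCast, List.getD]

lemma condDup_at (p : List String) (w : String) (ws : List String) :
    condDup (p ++ w :: ws) (p.length : Int) = PySem.Set.contains (PySem.Set.ofList p) w := by
  have h1 : PySem.List.slice (p ++ w :: ws) (some 0) (some (p.length : Int)) = p := by
    rw [PySem.List.slice_zero_start, PySem.List.slice_to_natCast, List.take_left]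
  rw [condDup, h1, pyGetD_append_length]
  by_cases hw : w ∈ p
  · simp [hw]
  · have h2 : ¬ w ∈ PySem.Set.ofList p := fun h => hw ((PySem.Set.mem_ofList p w).mp h)
    have h3 : PySem.Set.contains (PySem.Set.ofList p) w = false :=
      Bool.eq_false_iff.mpr (fun h => h2 ((contains_iff_mem _ _).mp h))
    rw [h3]
    simp [hw]

lemma condBreakChar_at (p : List String) (w : String) (ws : List String) (hp : p ≠ []) :
    condBreakChar (p ++ w :: ws) (p.length : Int) =
      !(PySem.Str.pyGet? w 0 == PySem.Str.pyGet? (p.getLast hp) (-1)) := by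
  have hlen : 1 ≤ p.length := List.length_pos_of_ne_nil hp
  have hcast : ((p.length : Int) - 1) = ((p.length - 1 : Nat) : Int) := by omega
  have h3 : PySem.List.pyGetD (p ++ w :: ws) ((p.length : Int) - 1) "" = p.getLast hp := by
    rw [hcast, PySem.List.pyGetD_natCast]
    have hlt : p.length - 1 < p.length := by omega
    rw [List.getD, List.getElem?_append_left hlt, List.getElem?_eq_getElem hlt]
    simp [List.getLast_eq_getElem]
  rw [condBreakChar, pyGetD_append_length, h3]

lemma pyGet?_last_isSome (s : String) (hs : s ≠ "") :
    (PySem.Str.pyGet? s (-1)).isSome = true := by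
  rw [PySem.Str.pyGet?, PySem.Chars.pyGet?, PySem.List.pyGet?_neg_one]
  have h : s.toList ≠ [] := fun h => hs (String.toList_eq_nil_iff.mp h)
  rw [List.getLast?_eq_some_getLast h]
  rfl

lemma go_eq (n : Int) (ws : List String) (p : List String) (hp : p ≠ [])
    (hlast : p.getLast hp ≠ "") :
    solutionGo n ws (p.length : Int) (PySem.Set.ofList p) (p.getLast hp) =
      renderIdx n (((List.range ws.length).map (fun k => ((p.length + k : Nat) : Int))).find?
        (condAll (p ++ ws))) := by
  induction ws generalizing p with
  | nil => simp [solutionGo, renderIdx]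
  | cons w ws ih =>
    have hcondall : condAll (p ++ w :: ws) (p.length : Int) =
        (PySem.Set.contains (PySem.Set.ofList p) w ||
          !(PySem.Str.pyGet? w 0 == PySem.Str.pyGet? (p.getLast hp) (-1))) := by
      rw [condAll, condDup_at, condBreakChar_at]
    have hrange : (List.range (w :: ws).length).map (fun k => ((p.length + k : Nat) : Int)) =
        ((p.length : Nat) : Int) ::
          (List.range ws.length).map (fun k => (((p ++ [w]).length + k : Nat) : Int)) := by
      simp only [List.length_cons, List.range_succ_eq_map, List.map_cons, List.map_map]
      refine List.cons_eq_cons.mpr ⟨by simp, ?_⟩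
      apply List.map_congr_left
      intro k hk
      simp only [Function.comp_apply, List.length_append, List.length_cons, List.length_nil]
      push_cast
      omega
    rw [hrange]
    by_cases hc : (PySem.Set.contains (PySem.Set.ofList p) w ||
        !(PySem.Str.pyGet? w 0 == PySem.Str.pyGet? (p.getLast hp) (-1))) = true
    · rw [solutionGo]
      simp only [hlast, if_false]
      rw [if_pos hc, List.find?_cons_of_pos (by rw [hcondall]; exact hc)]
      simp [renderIdx]
    · have hc' : ¬ condAll (p ++ w :: ws) ((p.length : Nat) : Int) = true := by
        rw [hcondall]; exact hc
      have hwne : w ≠ "" := by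
        intro hw
        apply hc
        subst hw
        have h0 : PySem.Str.pyGet? "" 0 = none := by decide
        have h1 := pyGet?_last_isSome (p.getLast hp) hlast
        rw [h0]
        cases h2 : PySem.Str.pyGet? (p.getLast hp) (-1) with
        | none => rw [h2] at h1; simp at h1
        | some c => simp
      rw [solutionGo]
      simp only [hlast, if_false]
      rw [if_neg hc, List.find?_cons_of_neg hc']
      have hp' : p ++ [w] ≠ [] := by simp
      have hlast' : (p ++ [w]).getLast hp' = w := by simp
      have hthis := ih (p ++ [w]) hp' (by rw [hlast']; exact hwne)
      rw [ofList_append_singleton] at hthis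
      rw [hlast'] at hthis
      have hlen' : ((p ++ [w]).length : Int) = (p.length : Int) + 1 := by simp
      rw [hlen'] at hthis
      rw [hthis]
      simp [List.append_assoc]

lemma go_empties (n : Int) (E ws : List String) (hE : ∀ x ∈ E, x = "") :
    ∀ (idx : Int) (s : PySem.Set String),
      solutionGo n (E ++ ws) idx s "" =
        solutionGo n ws (idx + E.length) (E.foldl PySem.Set.add s) "" := by
  induction E with
  | nil => intro idx s; simp
  | cons e E ih =>
    intro idx s
    have he : e = "" := hE e (by simp)
    subst he
    rw [List.cons_append, solutionGo, if_pos rfl,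
      ih (fun x hx => hE x (by simp [hx])) (idx + 1) (s.add "")]
    have : idx + 1 + (E.length : Int) = idx + ((E.length + 1 : Nat) : Int) := by push_cast; ring
    rw [this]
    rfl

lemma find?_range_eq_some (j : Nat) : ∀ (q : Nat → Bool) (m : Nat), j < m → q j = true →
    (∀ k < j, q k = false) → (List.range m).find? q = some j := by
  induction j with
  | zero =>
    intro q m hm hq _
    obtain ⟨m', rfl⟩ : ∃ m', m = m' + 1 := ⟨m - 1, by omega⟩
    rw [List.range_succ_eq_map]
    exact List.find?_cons_of_pos hq
  | succ j ih =>
    intro q m hm hq hmin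
    obtain ⟨m', rfl⟩ : ∃ m', m = m' + 1 := ⟨m - 1, by omega⟩
    rw [List.range_succ_eq_map, List.find?_cons_of_neg (by simp [hmin 0 (by omega)]),
      List.find?_map, ih (q ∘ Nat.succ) m' (by omega) hq (fun k hk => hmin (k + 1) (by omega))]
    rfl

lemma startPred_at (words : List String) (k : Nat) :
    (fun i => !(PySem.List.pyGetD words i "" == "")) ((0 : Int) + (k : Int))
      = !(words.getD k "" == "") := by
  have h : ((0 : Int) + (k : Int)) = (k : Int) := by ring
  simp only [h]
  show (!(PySem.List.pyGetD words (k : Int) "" == "")) = _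
  rw [PySem.List.pyGetD_natCast]

lemma start_val (E : List String) (w : String) (rest : List String)
    (hE : ∀ x ∈ E, x = "") (hw : w ≠ "") :
    ((PySem.List.pyRange 0 ((E ++ w :: rest).length : Int) 1).find?
        (fun i => !(PySem.List.pyGetD (E ++ w :: rest) i "" == ""))).getD
        ((E ++ w :: rest).length : Int) = (E.length : Int) := by
  rw [PySem.List.pyRange_one, List.find?_map]
  have hlen : (((E ++ w :: rest).length : Int) - 0).toNat = (E ++ w :: rest).length := by omega
  rw [hlen]
  have hfind : (List.range (E ++ w :: rest).length).find?
      ((fun i => !(PySem.List.pyGetD (E ++ w :: rest) i "" == "")) ∘ (fun (k : Nat) => (0 : Int) + (k : Int)))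
      = some E.length := by
    apply find?_range_eq_some E.length _ _ (by simp)
    · show ((fun i => !(PySem.List.pyGetD (E ++ w :: rest) i "" == ""))
        ((0 : Int) + (E.length : Int))) = true
      rw [startPred_at]
      have : (E ++ w :: rest).getD E.length "" = w := by
        simp [List.getD]
      rw [this]
      simpa using hw
    · intro k hk
      show ((fun i => !(PySem.List.pyGetD (E ++ w :: rest) i "" == ""))
        ((0 : Int) + (k : Int))) = false
      rw [startPred_at]
      have hme : (E ++ w :: rest).getD k "" = "" := by
        rw [List.getD, List.getElem?_append_left (by omega), List.getElem?_eq_getElem hk]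
        exact hE _ (List.getElem_mem hk)
      rw [hme]
      simp
  rw [hfind]
  simp

lemma alt_body (n : Int) (words : List String) (a : Int) :
    (if (min (((PySem.List.pyRange a (words.length : Int) 1).find? (condBreak words)).getD (words.length : Int))
             (((PySem.List.pyRange a (words.length : Int) 1).find? (condDup words)).getD (words.length : Int))
        == (words.length : Int))
     then ([0, 0] : List Int)
     else [PySem.Int.mod (min (((PySem.List.pyRange a (words.length : Int) 1).find? (condBreak words)).getD (words.length : Int))
             (((PySem.List.pyRange a (words.length : Int) 1).find? (condDup words)).getD (words.length : Int))) n + 1,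
           PySem.Int.floordiv (min (((PySem.List.pyRange a (words.length : Int) 1).find? (condBreak words)).getD (words.length : Int))
             (((PySem.List.pyRange a (words.length : Int) 1).find? (condDup words)).getD (words.length : Int))) n + 1])
    = renderIdx n ((PySem.List.pyRange a (words.length : Int) 1).find? (condAll words)) := by
  have hle : ∀ x ∈ PySem.List.pyRange a (words.length : Int) 1, x ≤ (words.length : Int) := by
    intro x hx
    exact le_of_lt (PySem.List.mem_pyRange_one.mp hx).2
  have hmerge := find_min_merge (PySem.List.pyRange a (words.length : Int) 1)
      (condBreak words) (condDup words) (words.length : Int)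
      (PySem.List.pairwise_lt_pyRange_one a (words.length : Int)) hle
  have heq : (fun x => condBreak words x || condDup words x) = condAll words := by
    funext i
    rw [condBreak_eq_char, condAll, Bool.or_comm]
  rw [heq] at hmerge
  rw [hmerge]
  cases hfind : (PySem.List.pyRange a (words.length : Int) 1).find? (condAll words) with
  | none => simp [renderIdx]
  | some i =>
    have hi := PySem.List.mem_pyRange_one.mp (List.mem_of_find?_eq_some hfind)
    have : ((i == (words.length : Int)) : Bool) = false := by
      simp only [beq_eq_false_iff_ne, ne_eq]
      omega
    simp [renderIdx, this]

-- ===== VERDICT (by name: the statement is the Claim_ definition above) =====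
theorem solution_spec : Claim_equal_solution := by
  intro n words _hdom _hpre
  unfold Spec_solution
  have hsplit : words.takeWhile (fun x => x == "") ++ words.dropWhile (fun x => x == "") = words :=
    List.takeWhile_append_dropWhile
  have hE : ∀ x ∈ words.takeWhile (fun x => x == ""), x = "" := by
    intro x hx
    simpa using List.mem_takeWhile_imp hx
  cases hd : words.dropWhile (fun x => x == "") with
  | nil =>
    -- every word is empty: both sides return [0, 0]
    have hEw : ∀ x ∈ words, x = "" := by
      rw [← hsplit, hd]
      simpa using hE
    have hA : solution n words = [0, 0] := by
      rw [solution, ← List.append_nil words, go_empties n words [] hEw]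
      rfl
    have hstart : ((PySem.List.pyRange 0 (words.length : Int) 1).find?
        (fun i => !(PySem.List.pyGetD words i "" == ""))).getD (words.length : Int)
        = (words.length : Int) := by
      have : (PySem.List.pyRange 0 (words.length : Int) 1).find?
          (fun i => !(PySem.List.pyGetD words i "" == "")) = none := by
        rw [PySem.List.pyRange_one, List.find?_map]
        have hnone : (List.range (((words.length : Int) - 0).toNat)).find?
            ((fun i => !(PySem.List.pyGetD words i "" == "")) ∘ (fun (k : Nat) => (0 : Int) + (k : Int)))
            = none := by
          rw [List.find?_eq_none]
          intro k hk
          show ¬ ((fun i => !(PySem.List.pyGetD words i "" == "")) ((0 : Int) + (k : Int))) = true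
          rw [startPred_at]
          have hk' : k < words.length := by simpa using List.mem_range.mp hk
          have : words.getD k "" = "" := by
            rw [List.getD, List.getElem?_eq_getElem hk']
            exact hEw _ (List.getElem_mem hk')
          rw [this]
          simp
        rw [hnone]
        rfl
      rw [this]
      rfl
    have hB : solution_alt n words = [0, 0] := by
      unfold solution_alt
      dsimp only
      rw [hstart]
      have hempty : PySem.List.pyRange ((words.length : Int) + 1) (words.length : Int) 1 = [] := by
        rw [PySem.List.pyRange_one]
        have : (((words.length : Int)) - ((words.length : Int) + 1)).toNat = 0 := by omega
        rw [this]
        rfl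
      rw [hempty]
      simp
    rw [hA, hB]
  | cons w rest =>
    have hw : w ≠ "" := by
      have hne : words.dropWhile (fun x => x == "") ≠ [] := by rw [hd]; simp
      have hnot := List.head_dropWhile_not (fun x => (x == "" : Bool)) hne
      have hh : (words.dropWhile (fun x => x == "")).head hne = w := by
        have := congrArg (fun t => t.head?) hd
        simpa [List.head?_eq_some_head hne] using this
      rw [hh] at hnot
      simpa using hnot
    set E := words.takeWhile (fun x => x == "") with hEdef
    have hwords : E ++ w :: rest = words := by
      rw [hEdef, ← hd]
      exact List.takeWhile_append_dropWhile
    -- A's side: cross the empty prefix, take the first nonempty word as chain start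
    have hA : solution n words =
        solutionGo n rest ((E ++ [w]).length : Int)
          (PySem.Set.ofList (E ++ [w]))
          ((E ++ [w]).getLast (by simp)) := by
      rw [solution, ← hwords, go_empties n _ (w :: rest) hE, solutionGo, if_pos rfl]
      have h1 : (0 : Int) + (E.length : Int) + 1 = ((E ++ [w]).length : Int) := by
        simp only [List.length_append, List.length_singleton]
        push_cast
        ring
      have h2 : (E.foldl PySem.Set.add PySem.Set.empty).add w
          = PySem.Set.ofList (E ++ [w]) := by
        rw [PySem.Set.ofList_eq_foldl, List.foldl_append]
        rfl
      have h3 : (E ++ [w]).getLast (by simp) = w := by simp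
      rw [h1, h2, h3]
    rw [hA, go_eq n rest _ (by simp) (by simpa using hw)]
    have hlist : (E ++ [w]) ++ rest = words := by
      rw [List.append_assoc, List.singleton_append, hwords]
    rw [hlist]
    -- B's side
    unfold solution_alt
    dsimp only
    have hstart : ((PySem.List.pyRange 0 (words.length : Int) 1).find?
        (fun i => !(PySem.List.pyGetD words i "" == ""))).getD (words.length : Int)
        = (E.length : Int) := by
      conv_lhs => rw [← hwords]
      exact start_val _ w rest hE hw
    rw [hstart, alt_body]
    congr 1
    rw [PySem.List.pyRange_one]
    have hlen : (((words.length : Int)) - ((E.length : Int) + 1)).toNat = rest.length := by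
      have : words.length = E.length + 1 + rest.length := by
        rw [← hwords]
        simp only [List.length_append, List.length_cons]
        omega
      omega
    rw [hlen]
    congr 1
    apply List.map_congr_left
    intro k hk
    simp only [List.length_append, List.length_cons, List.length_nil]
    push_cast
    ring
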